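-- pv_equiv track=rewrite | github.com/johnmoses/zero-to-hero-python-dsa | sliding_window/min_sum.py | findMinSum1
-- ===== SOURCE A (Python) =====
-- def findMinSum1(arr, k):
--     # Handle edge cases
--     if not arr or k > len(arr):
--         return 0
--
--     # Calculate sum of first k elements
--     curr_sum = sum(arr[:k])
--     min_sum = curr_sum
--
--     # Slide window and track min sum
--     for i in range(k, len(arr)):
--         curr_sum = curr_sum + arr[i] - arr[i-k]
--         min_sum = min(min_sum, curr_sum)
--
--     return min_sum
-- ===== SOURCE B (Python) =====
-- def findMinSum1(arr, k):
--     if not arr or k > len(arr):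
--         return 0
--     prefix = [0]
--     for x in arr:
--         prefix.append(prefix[-1] + x)
--     n = len(arr)
--     return min(prefix[j + k] - prefix[j] for j in range(n - k + 1))
-- ===== Notes on version B (the rewrite author's own statement) =====
-- stated objective: alternative
-- what changed: Replaces the incremental sliding-window update with a prefix-sum table built once, the answer then being the minimum of prefix[j+k]-prefix[j] over all window starts.
import Mathlib
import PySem

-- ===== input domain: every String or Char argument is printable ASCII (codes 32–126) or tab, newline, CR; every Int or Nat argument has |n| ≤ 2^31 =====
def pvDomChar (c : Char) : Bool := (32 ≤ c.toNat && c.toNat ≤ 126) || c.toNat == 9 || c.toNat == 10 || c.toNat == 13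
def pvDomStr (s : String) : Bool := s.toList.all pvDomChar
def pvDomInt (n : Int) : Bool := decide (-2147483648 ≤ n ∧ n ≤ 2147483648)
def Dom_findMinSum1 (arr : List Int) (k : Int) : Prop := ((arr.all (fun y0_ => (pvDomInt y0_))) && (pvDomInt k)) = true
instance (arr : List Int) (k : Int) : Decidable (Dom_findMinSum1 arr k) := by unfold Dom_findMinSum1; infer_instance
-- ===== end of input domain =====

-- B replaces A's incremental sliding-window update with a prefix-sum table plus a scan
-- of prefix[j+k]-prefix[j]; equal return values proved on Pre_ (both raise outside it).

-- ===== PORT A =====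
def findMinSum1 (arr : List Int) (k : Int) : Int :=
  if arr = [] ∨ k > (arr.length : Int) then 0
  else
    -- curr_sum = sum(arr[:k]); min_sum = curr_sum
    let currSum := (PySem.List.slice arr none (some k)).sum
    -- for i in range(k, len(arr)): curr_sum += arr[i] - arr[i-k]; min_sum = min(min_sum, curr_sum)
    let st := (PySem.List.pyRange k (arr.length : Int) 1).foldl
      (fun (st : Int × Int) i =>
        let c := st.1 + PySem.List.pyGetD arr i 0 - PySem.List.pyGetD arr (i - k) 0
        (c, min st.2 c)) (currSum, currSum)
    st.2

-- ===== PORT B =====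
def findMinSum1_alt (arr : List Int) (k : Int) : Int :=
  if arr = [] ∨ k > (arr.length : Int) then 0
  else
    -- prefix = [0]; for x in arr: prefix.append(prefix[-1] + x)
    let pfx := arr.foldl (fun acc x => acc ++ [PySem.List.pyGetD acc (-1) 0 + x]) [(0 : Int)]
    let n : Int := arr.length
    -- min(prefix[j+k] - prefix[j] for j in range(n - k + 1))
    let vals := (PySem.List.pyRange 0 (n - k + 1) 1).map
      (fun j => PySem.List.pyGetD pfx (j + k) 0 - PySem.List.pyGetD pfx j 0)
    (PySem.List.min? vals (fun y => y)).getD 0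

-- ===== PRECONDITION & SPEC =====
-- Pre_ excludes nonempty arr with k < 0, on which Python A (arr[i-k]) and Python B
-- (prefix[j] for j past the end) both raise IndexError.
def Pre_findMinSum1 (arr : List Int) (k : Int) : Prop := arr = [] ∨ 0 ≤ k
instance (arr : List Int) (k : Int) : Decidable (Pre_findMinSum1 arr k) := by unfold Pre_findMinSum1; infer_instance
def pvWitness_findMinSum1 : List Int × Int := ([1, -2, 3, 4], 2)

def Spec_findMinSum1 (arr : List Int) (k : Int) (out : Int) : Prop := out = findMinSum1_alt arr k
instance (arr : List Int) (k : Int) (out : Int) : Decidable (Spec_findMinSum1 arr k out) := by unfold Spec_findMinSum1; infer_instance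

-- ===== CLAIM (what is proved, stated in full; the proofs are below) =====
def Claim_equal_findMinSum1 : Prop := ∀ (arr : List Int) (k : Int), Dom_findMinSum1 arr k → Pre_findMinSum1 arr k → Spec_findMinSum1 arr k (findMinSum1 arr k)

-- ===== LEMMAS AND PROOFS =====

-- window sum starting at j, width κ
def pvWin (arr : List Int) (κ j : Nat) : Int := ((arr.drop j).take κ).sum

theorem pvWin_take (arr : List Int) (κ j : Nat) :
    pvWin arr κ j = (arr.take (j + κ)).sum - (arr.take j).sum := by
  simp [pvWin, List.take_add]

theorem pvWin_step (arr : List Int) (κ j : Nat) (h : j + κ < arr.length) :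
    pvWin arr κ (j + 1) = pvWin arr κ j + arr[j + κ] - arr[j] := by
  rw [pvWin_take, pvWin_take]
  have h1 : j + 1 + κ = (j + κ) + 1 := by omega
  rw [h1, List.sum_take_succ _ _ h, List.sum_take_succ _ _ (by omega : j < arr.length)]
  ring

theorem pvPrefixAux (arr : List Int) : ∀ (pre : List Int) (s : Int), pre.getLast? = some s →
    arr.foldl (fun acc x => acc ++ [PySem.List.pyGetD acc (-1) 0 + x]) pre
      = pre ++ (List.range arr.length).map (fun j => s + (arr.take (j + 1)).sum) := by
  induction arr with
  | nil => intro pre s _; simp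
  | cons x t ih =>
    intro pre s hs
    have hne : pre ≠ [] := by intro h; simp [h] at hs
    have hlast : PySem.List.pyGetD pre (-1) 0 = s := by
      rw [PySem.List.pyGetD_neg_one pre 0 hne]
      rw [List.getLast?_eq_some_getLast hne] at hs
      exact Option.some.inj hs
    simp only [List.foldl_cons, hlast]
    rw [ih (pre ++ [s + x]) (s + x) (by simp)]
    rw [List.append_assoc]
    congr 1
    rw [List.length_cons, List.range_succ_eq_map]
    simp [List.map_map, Function.comp]
    intro a _; ring

-- B's prefix-sum foldl computed
theorem pvPrefixFold (arr : List Int) :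
    arr.foldl (fun acc x => acc ++ [PySem.List.pyGetD acc (-1) 0 + x]) [(0 : Int)]
      = (List.range (arr.length + 1)).map (fun j => (arr.take j).sum) := by
  rw [pvPrefixAux arr [0] 0 rfl, List.range_succ_eq_map]
  simp [List.map_map, Function.comp]

-- A's sliding loop computed
theorem pvAloop (arr : List Int) (κ : Nat) (hk : κ ≤ arr.length) (m : Nat) (hm : m ≤ arr.length - κ) :
    ((List.range m).map (fun (t : Nat) => ((κ : Int) + (t : Int)))).foldl
      (fun (st : Int × Int) i =>
        let c := st.1 + PySem.List.pyGetD arr i 0 - PySem.List.pyGetD arr (i - (κ : Int)) 0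
        (c, min st.2 c)) (pvWin arr κ 0, pvWin arr κ 0)
    = (pvWin arr κ m, ((List.range m).map (fun t => pvWin arr κ (t + 1))).foldl min (pvWin arr κ 0)) := by
  induction m with
  | zero => simp
  | succ m ih =>
    rw [List.range_succ, List.map_append, List.foldl_append, ih (by omega)]
    rw [List.map_append, List.foldl_append]
    simp only [List.map_cons, List.map_nil, List.foldl_cons, List.foldl_nil]
    have hkm : κ + m < arr.length := by omega
    have hg1 : PySem.List.pyGetD arr ((κ : Int) + (m : Int)) 0 = arr[κ + m] := by
      have : ((κ : Int) + (m : Int)) = ((κ + m : Nat) : Int) := by push_cast; ring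
      rw [this, PySem.List.pyGetD_natCast]
      simp [List.getD_eq_getElem?_getD, List.getElem?_eq_getElem hkm]
    have hg2 : PySem.List.pyGetD arr ((κ : Int) + (m : Int) - (κ : Int)) 0 = arr[m] := by
      have : ((κ : Int) + (m : Int) - (κ : Int)) = ((m : Nat) : Int) := by ring
      rw [this, PySem.List.pyGetD_natCast]
      simp [List.getD_eq_getElem?_getD, List.getElem?_eq_getElem (by omega : m < arr.length)]
    simp only [hg1, hg2]
    have hstep : pvWin arr κ (m + 1) = pvWin arr κ m + arr[κ + m] - arr[m] := by
      have := pvWin_step arr κ m (by omega)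
      simp only [Nat.add_comm m κ] at this; exact this
    rw [hstep]

-- ===== VERDICT (by name: the statement is the Claim_ definition above) =====
theorem findMinSum1_spec : Claim_equal_findMinSum1 := by
  intro arr k _hdom hpre
  unfold Spec_findMinSum1 findMinSum1 findMinSum1_alt
  by_cases hif : arr = [] ∨ k > (arr.length : Int)
  · simp only [if_pos hif]
  · simp only [if_neg hif]
    push Not at hif
    obtain ⟨hne, hkn⟩ := hif
    have hk0 : 0 ≤ k := by
      rcases hpre with h | h
      · exact absurd h hne
      · exact h
    obtain ⟨κ, hκ⟩ : ∃ κ : Nat, (κ : Int) = k := ⟨k.toNat, Int.toNat_of_nonneg hk0⟩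
    subst hκ
    have hκn : κ ≤ arr.length := by exact_mod_cast hkn
    -- A's side
    have hslice : (PySem.List.slice arr none (some (κ : Int))).sum = pvWin arr κ 0 := by
      rw [PySem.List.slice_to arr (by positivity)]
      simp [pvWin]
    have hrange : PySem.List.pyRange (κ : Int) (arr.length : Int) 1
        = (List.range (arr.length - κ)).map (fun (t : Nat) => ((κ : Int) + (t : Int))) := by
      rw [PySem.List.pyRange_one]
      have h1 : ((arr.length : Int) - (κ : Int)).toNat = arr.length - κ := by omega
      rw [h1]
    rw [hslice, hrange]
    rw [pvAloop arr κ hκn (arr.length - κ) (le_refl _)]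
    -- B's side
    rw [pvPrefixFold arr]
    have hnk1 : (arr.length : Int) - (κ : Int) + 1 = ((arr.length - κ + 1 : Nat) : Int) := by
      push_cast; omega
    rw [hnk1, PySem.List.pyRange_zero_natCast, List.map_map]
    have hvals : (List.range (arr.length - κ + 1)).map
        ((fun j => PySem.List.pyGetD ((List.range (arr.length + 1)).map (fun j => (arr.take j).sum)) (j + (κ : Int)) 0
             - PySem.List.pyGetD ((List.range (arr.length + 1)).map (fun j => (arr.take j).sum)) j 0) ∘ (fun (t : Nat) => ((t : Nat) : Int)))
        = (List.range (arr.length - κ + 1)).map (fun j => pvWin arr κ j) := by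
      apply List.map_congr_left
      intro j hj
      rw [List.mem_range] at hj
      simp only [Function.comp]
      have hjk : ((j : Int) + (κ : Int)) = ((j + κ : Nat) : Int) := by push_cast; ring
      rw [hjk, PySem.List.pyGetD_natCast, PySem.List.pyGetD_natCast]
      rw [PySem.List.getD_map_range _ _ _ _ (by omega), PySem.List.getD_map_range _ _ _ _ (by omega)]
      rw [pvWin_take arr κ j]
    rw [hvals, List.range_succ_eq_map, List.map_cons, PySem.List.min?_id_cons]
    simp only [Option.getD_some, List.map_map]
    rfl
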